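-- pv_equiv track=rewrite | github.com/MaroDonato/bachelorproject_code | SEQ2/R4-5.py | Chymotrypsin_HighSpecificity
-- ===== SOURCE A (Python) =====
-- def Chymotrypsin_HighSpecificity(PeptideLibraryList):
--     Chemotrypsin_HighSpecificity = []
--     per_itemlist = []
--     for item in PeptideLibraryList:
--         try:
--             p = ['F','Y','W']
--             matches = [x for x in p if x in item]
--             p_count =len(matches)
--             if p_count == 0:
--                 Chemotrypsin_HighSpecificity.append("None")
--             else:
--                 for value in p:
--                     if value == 'W':
--                         a = 1
--                         a = item.find(value, a, -1)
--                         p_count = item.count(value, 1)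
--                         while p_count > 0:
--                             if a > 1:
--                                 if (item[a+1] != 'M') and (item[a+1] != 'P'):
--                                     per_itemlist.append(item[a-1:a+3])
--                                 else:
--                                     pass
--                             else:
--                                 pass
--                             a = item.find(value, a+1,-1)
--                             p_count -= 1
--                     else:
--                         a = 1
--                         a = item.find(value, a, -1)
--                         p_count = item.count(value, 1)
--                         while p_count > 0:
--                             if a > 1:
--                                 if (item[a+1] != 'P'):
--                                     per_itemlist.append(item[a-1:a+3])
--                                 else:
--                                     pass
--                             else:
--                                 pass
--                             a = item.find(value, a+1,-1)
--                             p_count -= 1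
--
--                 if len(per_itemlist) > 0:
--                     Chemotrypsin_HighSpecificity.append(per_itemlist)
--                     per_itemlist = []
--                 else:
--                     Chemotrypsin_HighSpecificity.append("None")
--         except IndexError:
--             Chemotrypsin_HighSpecificity.append("error")
--     FinalChymo = [" ".join([str(c) for c in lst]) for lst in Chemotrypsin_HighSpecificity]
--
--     return FinalChymo
-- ===== SOURCE B (Python) =====
-- # Simpler one-pass re-implementation: a position scan per peptide instead of
-- # find/count while-loops; reproduces A's final char-joining of "None" -> "N o n e".
-- def Chymotrypsin_HighSpecificity(PeptideLibraryList):
--     forbidden = {'F': ('P',), 'Y': ('P',), 'W': ('M', 'P')}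
--     out = []
--     for item in PeptideLibraryList:
--         motifs = [item[a - 1:a + 3]
--                   for v in 'FYW'
--                   for a in range(2, len(item) - 1)
--                   if item[a] == v and item[a + 1] not in forbidden[v]]
--         out.append(" ".join(motifs) if motifs else "N o n e")
--     return out
-- ===== Notes on version B (the rewrite author's own statement) =====
-- stated objective: simpler
-- what changed: Replaces A's per-residue find/count driven while-loops (with sentinel -1 restarts and a separately maintained counter) by a single direct scan over positions 2..len-2 per peptide collecting motifs in one comprehension; the quirky final char-wise join of the 'None' sentinel is kept exactly ('N o n e').
import Mathlib
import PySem

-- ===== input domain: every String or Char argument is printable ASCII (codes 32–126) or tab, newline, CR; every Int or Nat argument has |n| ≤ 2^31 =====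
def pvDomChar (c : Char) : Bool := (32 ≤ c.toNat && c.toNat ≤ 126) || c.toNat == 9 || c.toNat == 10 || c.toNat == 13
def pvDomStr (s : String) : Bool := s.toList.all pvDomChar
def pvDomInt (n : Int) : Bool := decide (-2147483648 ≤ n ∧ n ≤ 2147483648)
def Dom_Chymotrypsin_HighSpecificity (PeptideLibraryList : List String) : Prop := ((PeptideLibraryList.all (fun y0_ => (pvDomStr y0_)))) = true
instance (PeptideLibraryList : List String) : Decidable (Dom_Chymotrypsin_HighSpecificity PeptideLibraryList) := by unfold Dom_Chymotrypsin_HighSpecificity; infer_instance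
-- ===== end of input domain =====

-- B replaces A's per-residue find/count while-loops by a single left-to-right position
-- scan per peptide (simpler decomposition); it reproduces A's deliberate final
-- " ".join over the sentinel string, i.e. "None" is rendered as "N o n e".

-- ===== PORT A =====
-- an element of Chemotrypsin_HighSpecificity: either a sentinel string ("None"/"error")
-- or the per-item list of motif strings
inductive PVEntry where
  | str : String → PVEntry
  | lst : List String → PVEntry
deriving DecidableEq, Repr

-- the inner 'while p_count > 0' loop; fuel = p_count, a = current find result;
-- ok is the literal next-residue test of the branch; .error = IndexError (carries
-- the per_itemlist state at the moment of the exception)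
def pvLoopA (cs : List Char) (ok : Char → Bool) (v : Char) :
    Nat → Int → List String → Except (List String) (List String)
  | 0, _, per => .ok per
  | n + 1, a, per =>
    if 1 < a then
      match PySem.List.pyGet? cs (a + 1) with
      | none => .error per
      | some ch =>
        let per' := if ok ch then
            per ++ [String.ofList (PySem.List.slice cs (some (a - 1)) (some (a + 3)))]
          else per
        pvLoopA cs ok v n (PySem.Chars.findFrom cs [v] (a + 1) (some (-1))) per'
    else
      pvLoopA cs ok v n (PySem.Chars.findFrom cs [v] (a + 1) (some (-1))) per

-- 'for value in p': the two textually duplicated while-loops of A, threading per_itemlist.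
-- item.count(value, 1) is ported by hand as the List.count of the slice item[1:] —
-- exact here because value is a single character (no overlapping occurrences).
def pvResiduesA (cs : List Char) :
    List Char → List String → Except (List String) (List String)
  | [], per => .ok per
  | v :: vs, per =>
    let r :=
      if v = 'W' then
        pvLoopA cs (fun ch => ch != 'M' && ch != 'P') v
          ((PySem.List.slice cs (some 1) none).count v)
          (PySem.Chars.findFrom cs [v] 1 (some (-1))) per
      else
        pvLoopA cs (fun ch => ch != 'P') v
          ((PySem.List.slice cs (some 1) none).count v)
          (PySem.Chars.findFrom cs [v] 1 (some (-1))) per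
    match r with
    | .error perE => .error perE
    | .ok per' => pvResiduesA cs vs per'

-- the outer 'for item in PeptideLibraryList' loop, threading per_itemlist across items
def pvItemsA : List String → List String → List PVEntry
  | [], _ => []
  | item :: rest, per =>
    let cs := item.toList
    let matched := (['F', 'Y', 'W']).filter (fun x => PySem.Chars.isIn [x] cs)
    if matched.length = 0 then
      PVEntry.str "None" :: pvItemsA rest per
    else
      match pvResiduesA cs ['F', 'Y', 'W'] per with
      | .error perE => PVEntry.str "error" :: pvItemsA rest perE
      | .ok per' =>
        if 0 < per'.length then PVEntry.lst per' :: pvItemsA rest []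
        else PVEntry.str "None" :: pvItemsA rest per'

-- the final '" ".join([str(c) for c in lst])' (a string is joined character-wise)
def pvFinalJoin : PVEntry → String
  | .str s => PySem.Str.join " " (s.toList.map (fun c => String.ofList [c]))
  | .lst l => PySem.Str.join " " l

def Chymotrypsin_HighSpecificity (PeptideLibraryList : List String) : List String :=
  (pvItemsA PeptideLibraryList []).map pvFinalJoin

-- ===== PORT B =====
def Chymotrypsin_HighSpecificity_alt (PeptideLibraryList : List String) : List String :=
  PeptideLibraryList.map (fun item =>
    let cs := item.toList
    let motifs := (['F', 'Y', 'W']).flatMap (fun v =>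
      let bad : List Char := if v = 'W' then ['M', 'P'] else ['P']
      (PySem.List.pyRange 2 ((cs.length : Int) - 1) 1).filterMap (fun a =>
        match PySem.List.pyGet? cs a, PySem.List.pyGet? cs (a + 1) with
        | some x, some y =>
          if x == v && !(bad.contains y) then
            some (String.ofList (PySem.List.slice cs (some (a - 1)) (some (a + 3))))
          else none
        | _, _ => none))
    if motifs.isEmpty then "N o n e" else PySem.Str.join " " motifs)

-- ===== PRECONDITION & SPEC =====
def Spec_Chymotrypsin_HighSpecificity (PeptideLibraryList : List String) (out : List String) : Prop := out = Chymotrypsin_HighSpecificity_alt PeptideLibraryList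
instance (PeptideLibraryList : List String) (out : List String) : Decidable (Spec_Chymotrypsin_HighSpecificity PeptideLibraryList out) := by unfold Spec_Chymotrypsin_HighSpecificity; infer_instance

-- ===== CLAIM (what is proved, stated in full; the proofs are below) =====
def Claim_equal_Chymotrypsin_HighSpecificity : Prop := ∀ (PeptideLibraryList : List String), Dom_Chymotrypsin_HighSpecificity PeptideLibraryList → Spec_Chymotrypsin_HighSpecificity PeptideLibraryList (Chymotrypsin_HighSpecificity PeptideLibraryList)

-- ===== LEMMAS AND PROOFS =====

-- the positions scanned by A's find-loop for residue v, from start s: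
-- indices i ∈ [s, len-1) with cs[i] = v, in increasing order
def pvOcc (cs : List Char) (v : Char) (s : Nat) : List Nat :=
  (List.range' s (cs.length - 1 - s)).filter (fun i => cs[i]? == some v)

-- what one accepted position contributes (none if a = 1 or the next residue is forbidden)
def pvFI (cs : List Char) (ok : Char → Bool) (i : Nat) : Option String :=
  if 1 < i ∧ ok (cs.getD (i + 1) ' ') = true then
    some (String.ofList (PySem.List.slice cs (some ((i : Int) - 1)) (some ((i : Int) + 3))))
  else none

def pvOk (v : Char) : Char → Bool :=
  if v = 'W' then (fun ch => ch != 'M' && ch != 'P') else (fun ch => ch != 'P')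

def pvMotifsFor (cs : List Char) (v : Char) : List String :=
  (pvOcc cs v 1).filterMap (pvFI cs (pvOk v))

theorem pvOcc_mem (cs : List Char) (v : Char) (s i : Nat) :
    i ∈ pvOcc cs v s ↔ s ≤ i ∧ i < cs.length - 1 ∧ cs[i]? = some v := by
  simp only [pvOcc, List.mem_filter, List.mem_range'_1, beq_iff_eq]
  constructor
  · rintro ⟨⟨h1, h2⟩, h3⟩; exact ⟨h1, by omega, h3⟩
  · rintro ⟨h1, h2, h3⟩; exact ⟨⟨h1, by omega⟩, h3⟩

theorem pvOcc_pairwise (cs : List Char) (v : Char) (s : Nat) :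
    (pvOcc cs v s).Pairwise (· < ·) :=
  (List.pairwise_lt_range' 1 Nat.one_pos).filter _

theorem pvWindow_get (cs : List Char) (s j : Nat) :
    ((cs.take (cs.length - 1)).drop s)[j]? =
      if s + j < cs.length - 1 then cs[s + j]? else none := by
  simp [List.getElem?_drop, List.getElem?_take]

theorem pvWindow_mem (cs : List Char) (v : Char) (s : Nat) :
    v ∈ (cs.take (cs.length - 1)).drop s ↔ ∃ i, i ∈ pvOcc cs v s := by
  constructor
  · intro hv
    obtain ⟨j, hj, he⟩ := List.getElem_of_mem hv
    have hg := pvWindow_get cs s j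
    rw [List.getElem?_eq_getElem hj, he] at hg
    have hb : s + j < cs.length - 1 := by
      by_contra hlt
      rw [if_neg hlt] at hg; exact absurd hg (by simp)
    rw [if_pos hb] at hg
    exact ⟨s + j, (pvOcc_mem _ _ _ _).2 ⟨by omega, hb, hg.symm⟩⟩
  · rintro ⟨i, hi⟩
    rw [pvOcc_mem] at hi
    obtain ⟨h1, h2, h3⟩ := hi
    have : ((cs.take (cs.length - 1)).drop s)[i - s]? = some v := by
      rw [pvWindow_get, show s + (i - s) = i from by omega, if_pos h2, h3]
    exact List.mem_of_getElem? this

theorem pvSingleton_prefix_iff (v : Char) (l : List Char) :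
    [v] <+: l ↔ l.head? = some v := by
  rw [List.cons_prefix_iff]
  constructor
  · rintro ⟨l', rfl, -⟩; rfl
  · intro h
    cases l with
    | nil => simp at h
    | cons x xs => simp at h; exact ⟨xs, by rw [h], by simp⟩

theorem pvSingleton_infix_iff (v : Char) (l : List Char) :
    [v] <:+: l ↔ v ∈ l := by
  constructor
  · intro h; exact h.subset (List.mem_singleton_self v)
  · intro h
    obtain ⟨s, t, rfl⟩ := List.append_of_mem h
    exact ⟨s, t, by simp⟩

-- findFrom with end = -1 unfolded, for a nonempty string and a Nat start
theorem pvFindFrom_eq (cs : List Char) (v : Char) (s : Nat) (hlen : 1 ≤ cs.length) :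
    PySem.Chars.findFrom cs [v] (s : Int) (some (-1)) =
      if ((cs.length : Int) - 1) < (s : Int) then -1
      else if PySem.Chars.find ((cs.take (cs.length - 1)).drop s) [v] = -1 then -1
      else (s : Int) + PySem.Chars.find ((cs.take (cs.length - 1)).drop s) [v] := by
  simp only [PySem.Chars.findFrom]
  rw [if_neg (show ¬ ((cs.length : Int) < -1) from by omega)]
  rw [if_pos (show (-1 : Int) < 0 from by norm_num)]
  rw [if_neg (show ¬ ((-1 : Int) + (cs.length : Int) < 0) from by omega)]
  rw [if_neg (show ¬ ((s : Int) < 0) from by omega)]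
  rw [show ((-1 : Int) + (cs.length : Int)).toNat = cs.length - 1 from by omega]
  rw [Int.toNat_natCast]
  rw [show (-1 : Int) + (cs.length : Int) = (cs.length : Int) - 1 from by ring]

theorem pvFindFrom_nil (v : Char) (s : Nat) :
    PySem.Chars.findFrom [] [v] (s : Int) (some (-1)) = -1 := by
  have hf : PySem.Chars.find ([] : List Char) [v] = -1 := by
    rw [PySem.Chars.find_eq_neg_one_iff, pvSingleton_infix_iff]; simp
  simp only [PySem.Chars.findFrom, List.length_nil, Nat.cast_zero]
  rw [if_neg (show ¬ ((0 : Int) < -1) from by norm_num)]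
  rw [if_pos (show (-1 : Int) < 0 from by norm_num)]
  rw [if_pos (show (-1 : Int) + 0 < 0 from by norm_num)]
  rw [if_neg (show ¬ ((s : Int) < 0) from by omega)]
  split_ifs <;> try rfl
  all_goals (exfalso; rename_i hcon; apply hcon; simpa using hf)

-- characterization of A's item.find(value, s, -1): the head of pvOcc, or -1
theorem pvFindFrom_occ (cs : List Char) (v : Char) (s : Nat) :
    PySem.Chars.findFrom cs [v] (s : Int) (some (-1)) =
      match pvOcc cs v s with
      | [] => -1
      | a :: _ => (a : Int) := by
  rcases hocc : pvOcc cs v s with _ | ⟨a, t⟩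
  · rcases Nat.eq_zero_or_pos cs.length with hlen | hlen
    · rw [List.length_eq_zero_iff] at hlen
      subst hlen
      exact pvFindFrom_nil v s
    · have hw : v ∉ (cs.take (cs.length - 1)).drop s := by
        rw [pvWindow_mem]; rintro ⟨i, hi⟩; rw [hocc] at hi; simp at hi
      have hfind : PySem.Chars.find ((cs.take (cs.length - 1)).drop s) [v] = -1 := by
        rw [PySem.Chars.find_eq_neg_one_iff, pvSingleton_infix_iff]; exact hw
      rw [pvFindFrom_eq cs v s hlen, hfind, if_pos (rfl : (-1 : Int) = -1)]
      split_ifs <;> rfl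
  · have ha := (pvOcc_mem cs v s a).1 (hocc ▸ List.mem_cons_self)
    obtain ⟨hsa, han, hav⟩ := ha
    have hn2 : 2 ≤ cs.length := by omega
    set w := (cs.take (cs.length - 1)).drop s with hwdef
    have hwlen : w.length = cs.length - 1 - s := by
      rw [hwdef]; simp; try omega
    have hwa : w[a - s]? = some v := by
      rw [hwdef, pvWindow_get, show s + (a - s) = a from by omega, if_pos han, hav]
    have hvw : v ∈ w := List.mem_of_getElem? hwa
    have hr0 : 0 ≤ PySem.Chars.find w [v] := by
      rw [PySem.Chars.find_nonneg_iff, pvSingleton_infix_iff]; exact hvw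
    obtain ⟨hpre, hmin⟩ := PySem.Chars.find_spec hr0
    set r := PySem.Chars.find w [v] with hrdef
    have hwr : w[r.toNat]? = some v := by
      rw [← List.head?_drop]; rw [pvSingleton_prefix_iff] at hpre; exact hpre
    have hrlen : r.toNat < w.length := by
      by_contra hle
      rw [List.getElem?_eq_none (by omega)] at hwr; exact absurd hwr (by simp)
    have hcs : cs[s + r.toNat]? = some v := by
      have hgw := pvWindow_get cs s r.toNat
      rw [← hwdef, hwr, if_pos (show s + r.toNat < cs.length - 1 from by omega)] at hgw
      exact hgw.symm
    have hsr : s + r.toNat ∈ pvOcc cs v s :=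
      (pvOcc_mem _ _ _ _).2 ⟨by omega, by omega, hcs⟩
    have hle1 : a ≤ s + r.toNat := by
      have hp := pvOcc_pairwise cs v s
      rw [hocc] at hp
      rw [hocc] at hsr
      rcases List.mem_cons.1 hsr with h | h
      · omega
      · have := (List.pairwise_cons.1 hp).1 _ h; omega
    have hle2 : s + r.toNat ≤ a := by
      by_contra hlt
      have hm : ¬ [v] <+: w.drop (a - s) := hmin (a - s) (by omega)
      rw [pvSingleton_prefix_iff, List.head?_drop] at hm
      exact hm hwa
    rw [pvFindFrom_eq cs v s (by omega)]
    rw [if_neg (show ¬ ((cs.length : Int) - 1 < (s : Int)) from by omega)]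
    rw [← hwdef, ← hrdef]
    rw [if_neg (show ¬ (r = -1) from by omega)]
    show (s : Int) + r = (a : Int)
    omega

theorem pvOcc_tail (cs : List Char) (v : Char) {s a : Nat} {t : List Nat}
    (h : pvOcc cs v s = a :: t) :
    t = pvOcc cs v (a + 1) ∧ s ≤ a ∧ a < cs.length - 1 ∧ cs[a]? = some v := by
  have ha := (pvOcc_mem cs v s a).1 (h ▸ List.mem_cons_self)
  obtain ⟨hsa, han, hav⟩ := ha
  have hsplit : List.range' s (cs.length - 1 - s)
      = List.range' s (a + 1 - s) ++ List.range' (a + 1) (cs.length - 1 - (a + 1)) := by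
    have h1 : a + 1 - s + (cs.length - 1 - (a + 1)) = cs.length - 1 - s := by omega
    calc List.range' s (cs.length - 1 - s)
        = List.range' s (a + 1 - s + (cs.length - 1 - (a + 1))) := by rw [h1]
      _ = List.range' s (a + 1 - s) ++ List.range' (s + 1 * (a + 1 - s)) (cs.length - 1 - (a + 1)) :=
          (List.range'_append).symm
      _ = List.range' s (a + 1 - s) ++ List.range' (a + 1) (cs.length - 1 - (a + 1)) := by
          rw [show s + 1 * (a + 1 - s) = a + 1 from by omega]
  have hdecomp : a :: t
      = (List.range' s (a + 1 - s)).filter (fun i => cs[i]? == some v) ++ pvOcc cs v (a + 1) := by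
    rw [← h, pvOcc, hsplit, List.filter_append]; rfl
  rcases hF : (List.range' s (a + 1 - s)).filter (fun i => cs[i]? == some v) with _ | ⟨b, F'⟩
  · rw [hF, List.nil_append] at hdecomp
    exfalso
    have hmem : a ∈ pvOcc cs v (a + 1) := by rw [← hdecomp]; exact List.mem_cons_self
    have := (pvOcc_mem cs v (a + 1) a).1 hmem
    omega
  · rw [hF] at hdecomp
    simp only [List.cons_append, List.cons.injEq] at hdecomp
    obtain ⟨hb, ht⟩ := hdecomp
    rcases F' with _ | ⟨x, F''⟩
    · exact ⟨by simpa using ht, hsa, han, hav⟩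
    · exfalso
      have hx1 : x ∈ List.range' s (a + 1 - s) := by
        have hxm : x ∈ (List.range' s (a + 1 - s)).filter (fun i => cs[i]? == some v) := by
          rw [hF]; simp
        exact (List.mem_filter.1 hxm).1
      have hx2 : x < a + 1 := by
        rw [List.mem_range'_1] at hx1; omega
      have hxt : x ∈ t := by rw [ht]; simp
      have hp := pvOcc_pairwise cs v s
      rw [h] at hp
      have := (List.pairwise_cons.1 hp).1 _ hxt
      omega

-- the inner while-loop collects exactly the contributions of pvOcc, in order
theorem pvLoop_spec (cs : List Char) (ok : Char → Bool) (v : Char) :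
    ∀ (l : List Nat) (e s : Nat) (per : List String), 1 ≤ s → e ≤ 1 →
      pvOcc cs v s = l →
      pvLoopA cs ok v (l.length + e) (PySem.Chars.findFrom cs [v] (s : Int) (some (-1))) per
        = .ok (per ++ l.filterMap (pvFI cs ok)) := by
  intro l
  induction l with
  | nil =>
    intro e s per hs he h
    rw [pvFindFrom_occ, h]
    interval_cases e
    · simp [pvLoopA]
    · show pvLoopA cs ok v (0 + 1) (-1) per = _
      rw [pvLoopA]
      rw [if_neg (show ¬ ((1 : Int) < -1) from by norm_num)]
      simp [pvLoopA]
  | cons a t ih =>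
    intro e s per hs he h
    obtain ⟨ht, hsa, han, hav⟩ := pvOcc_tail cs v h
    rw [pvFindFrom_occ, h]
    simp only [List.length_cons]
    rw [show t.length + 1 + e = (t.length + e) + 1 from by omega]
    show pvLoopA cs ok v ((t.length + e) + 1) (a : Int) per
        = Except.ok (per ++ List.filterMap (pvFI cs ok) (a :: t))
    rw [pvLoopA]
    have hcast : (a : Int) + 1 = ((a + 1 : Nat) : Int) := by push_cast; ring
    by_cases h1a : 1 < a
    · rw [if_pos (by exact_mod_cast h1a)]
      have hget : PySem.List.pyGet? cs ((a : Int) + 1) = some (cs.getD (a + 1) ' ') := by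
        rw [hcast, PySem.List.pyGet?_natCast,
          List.getElem?_eq_getElem (by omega : a + 1 < cs.length)]
        rw [List.getD_eq_getElem cs ' ' (by omega : a + 1 < cs.length)]
      rw [hget]
      show pvLoopA cs ok v (t.length + e)
          (PySem.Chars.findFrom cs [v] ((a : Int) + 1) (some (-1)))
          (if ok (cs.getD (a + 1) ' ') then
            per ++ [String.ofList (PySem.List.slice cs (some ((a : Int) - 1)) (some ((a : Int) + 3)))]
          else per) = _
      rw [hcast, ih e (a + 1) _ (by omega) he ht.symm]
      rw [List.filterMap_cons]
      by_cases hok : ok (cs.getD (a + 1) ' ')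
      · rw [if_pos hok]
        have hfi : pvFI cs ok a
            = some (String.ofList (PySem.List.slice cs (some ((a : Int) - 1)) (some ((a : Int) + 3)))) := by
          rw [pvFI, if_pos ⟨h1a, hok⟩]
        rw [hfi]
        simp
      · rw [if_neg hok]
        have hfi : pvFI cs ok a = none := by
          rw [pvFI, if_neg]; rintro ⟨-, hok'⟩; exact hok hok'
        rw [hfi]
    · rw [if_neg (by exact_mod_cast h1a)]
      show pvLoopA cs ok v (t.length + e)
          (PySem.Chars.findFrom cs [v] ((a : Int) + 1) (some (-1))) per = _
      rw [hcast, ih e (a + 1) _ (by omega) he ht.symm]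
      rw [List.filterMap_cons]
      have hfi : pvFI cs ok a = none := by
        rw [pvFI, if_neg]; rintro ⟨hlt, -⟩; omega
      rw [hfi]

-- List.count as a count of matching indices
theorem pvCount_indices (l : List Char) (v : Char) :
    l.count v = ((List.range l.length).filter (fun i => l[i]? == some v)).length := by
  induction l with
  | nil => simp
  | cons x xs ih =>
    rw [List.count_cons, ih, List.length_cons, List.range_succ_eq_map, List.filter_cons]
    have hps : ((fun i => ((x :: xs) : List Char)[i]? == some v) ∘ Nat.succ)
        = (fun i => xs[i]? == some v) := by
      funext i; simp
    have h0 : (((x :: xs) : List Char)[0]? == some v) = (x == v) := by simp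
    rw [h0, List.filter_map, hps]
    cases hxv : (x == v) <;> simp

-- fuel of A's while-loop: count(value, 1) = |pvOcc from 1| + e with e ≤ 1
-- (e accounts for an occurrence at the last index, counted but never found)
theorem pvCount_occ (cs : List Char) (v : Char) :
    ∃ e, e ≤ 1 ∧ (PySem.List.slice cs (some 1) none).count v = (pvOcc cs v 1).length + e := by
  rw [PySem.List.slice_from_one]
  have hcnt : cs.tail.count v
      = ((List.range (cs.length - 1)).filter (fun i => cs[i + 1]? == some v)).length := by
    rw [pvCount_indices, List.length_tail]
    congr 1
    apply List.filter_congr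
    intro i _
    rw [List.getElem?_tail]
  have hocc : (pvOcc cs v 1).length
      = ((List.range (cs.length - 1 - 1)).filter (fun i => cs[i + 1]? == some v)).length := by
    rw [pvOcc, List.range'_eq_map_range, List.filter_map, List.length_map]
    congr 1
    apply List.filter_congr
    intro i _
    show (cs[1 + i]? == some v) = (cs[i + 1]? == some v)
    rw [Nat.add_comm 1 i]
  by_cases h2 : 2 ≤ cs.length
  · have hsplit : List.range (cs.length - 1) = List.range (cs.length - 1 - 1) ++ [cs.length - 1 - 1] := by
      have e1 : List.range (cs.length - 1) = List.range ((cs.length - 1 - 1) + 1) := by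
        congr 1; omega
      rw [e1, List.range_succ]
    refine ⟨if cs[cs.length - 1 - 1 + 1]? == some v then 1 else 0, by split <;> omega, ?_⟩
    rw [hcnt, hocc, hsplit, List.filter_append, List.length_append, List.filter_cons]
    split <;> simp
  · refine ⟨0, by omega, ?_⟩
    rw [hcnt, hocc, show cs.length - 1 - 1 = 0 from by omega, show cs.length - 1 = 0 from by omega]
    simp

-- the residue loop of A appends exactly the motifs of each residue, in residue order
theorem pvResidues_spec (cs : List Char) :
    ∀ (ps : List Char) (per : List String),
      pvResiduesA cs ps per = .ok (per ++ ps.flatMap (pvMotifsFor cs)) := by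
  intro ps
  induction ps with
  | nil => intro per; simp [pvResiduesA]
  | cons v vs ih =>
    intro per
    obtain ⟨e, he, hc⟩ := pvCount_occ cs v
    have hloop : ∀ ok : Char → Bool,
        pvLoopA cs ok v ((PySem.List.slice cs (some 1) none).count v)
          (PySem.Chars.findFrom cs [v] 1 (some (-1))) per
        = .ok (per ++ (pvOcc cs v 1).filterMap (pvFI cs ok)) := by
      intro ok
      rw [hc]
      have h := pvLoop_spec cs ok v (pvOcc cs v 1) e 1 per (le_refl 1) he rfl
      rw [Nat.cast_one] at h
      exact h
    rw [pvResiduesA]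
    by_cases hv : v = 'W'
    · rw [if_pos hv, hloop]
      show pvResiduesA cs vs
          (per ++ (pvOcc cs v 1).filterMap (pvFI cs (fun ch => ch != 'M' && ch != 'P'))) = _
      rw [ih]
      rw [List.flatMap_cons, pvMotifsFor, pvOk, if_pos hv]
      simp [List.append_assoc]
    · rw [if_neg hv, hloop]
      show pvResiduesA cs vs
          (per ++ (pvOcc cs v 1).filterMap (pvFI cs (fun ch => ch != 'P'))) = _
      rw [ih]
      rw [List.flatMap_cons, pvMotifsFor, pvOk, if_neg hv]
      simp [List.append_assoc]

theorem pvOk_contains (v ch : Char) :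
    pvOk v ch = !((if v = 'W' then ['M', 'P'] else ['P']).contains ch) := by
  cases h1 : ch == 'M' <;> cases h2 : ch == 'P' <;> by_cases hv : v = 'W' <;>
    simp_all [pvOk]

-- B's comprehension for one residue equals the motif list of that residue
theorem pvAlt_inner (cs : List Char) (v : Char) :
    (PySem.List.pyRange 2 ((cs.length : Int) - 1) 1).filterMap (fun a =>
        match PySem.List.pyGet? cs a, PySem.List.pyGet? cs (a + 1) with
        | some x, some y =>
          if x == v && !((if v = 'W' then ['M', 'P'] else ['P']).contains y) then
            some (String.ofList (PySem.List.slice cs (some (a - 1)) (some (a + 3))))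
          else none
        | _, _ => none)
      = pvMotifsFor cs v := by
  by_cases h3 : 3 ≤ cs.length
  · have hlen3 : ((cs.length : Int) - 1 - 2).toNat = cs.length - 3 := by omega
    rw [PySem.List.pyRange_one, hlen3]
    rw [pvMotifsFor, pvOcc, show cs.length - 1 - 1 = (cs.length - 3) + 1 from by omega,
      List.range'_succ, List.filter_cons]
    have hfi1 : pvFI cs (pvOk v) 1 = none := by
      rw [pvFI, if_neg]; rintro ⟨hlt, -⟩; omega
    suffices hmain : (List.map (fun k => (2 : Int) + (k : Nat)) (List.range (cs.length - 3))).filterMap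
          (fun a => match PySem.List.pyGet? cs a, PySem.List.pyGet? cs (a + 1) with
            | some x, some y =>
              if x == v && !((if v = 'W' then ['M', 'P'] else ['P']).contains y) then
                some (String.ofList (PySem.List.slice cs (some (a - 1)) (some (a + 3))))
              else none
            | _, _ => none)
        = (List.filter (fun i => cs[i]? == some v) (List.range' 2 (cs.length - 3))).filterMap
            (pvFI cs (pvOk v)) by
      by_cases hP1 : (cs[1]? == some v) = true
      · rw [if_pos hP1, List.filterMap_cons, hfi1]
        exact hmain
      · rw [if_neg hP1]
        exact hmain
    rw [List.filterMap_filter, List.range'_eq_map_range]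
    simp only [List.filterMap_map]
    apply List.filterMap_congr
    intro k hk
    rw [List.mem_range] at hk
    have hb1 : 2 + k < cs.length := by omega
    have hb2 : 3 + k < cs.length := by omega
    have hc1 : (2 : Int) + (k : Int) = ((2 + k : Nat) : Int) := by push_cast; ring
    have hc2 : ((2 + k : Nat) : Int) + 1 = ((3 + k : Nat) : Int) := by push_cast; ring
    simp only [Function.comp_apply]
    rw [hc1, hc2, PySem.List.pyGet?_natCast, PySem.List.pyGet?_natCast,
      List.getElem?_eq_getElem hb1, List.getElem?_eq_getElem hb2]
    have hsome : ((some cs[2 + k] == some v)) = (cs[2 + k] == v) := by simp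
    rw [hsome]
    have hgetD : cs.getD (2 + k + 1) ' ' = cs[3 + k]'hb2 := by
      rw [show 2 + k + 1 = 3 + k from by omega]
      exact List.getD_eq_getElem cs ' ' hb2
    cases hx : cs[2 + k] == v
    · simp [hx]
    · cases hy : (if v = 'W' then ['M', 'P'] else ['P']).contains cs[3 + k]
      · have hokv : pvOk v cs[3 + k] = true := by rw [pvOk_contains, hy]; rfl
        simp at hy
        simp [hx, hy, pvFI, hokv, show (1 : Nat) < 2 + k from by omega,
          show 2 + k + 1 = 3 + k from by omega, List.getElem?_eq_getElem hb2]
      · have hokv : pvOk v cs[3 + k] = false := by rw [pvOk_contains, hy]; rfl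
        simp at hy
        simp [hx, hy, pvFI, hokv,
          show 2 + k + 1 = 3 + k from by omega, List.getElem?_eq_getElem hb2]
  · have h1 : PySem.List.pyRange 2 ((cs.length : Int) - 1) 1 = [] := by
      rw [PySem.List.pyRange_one_eq_nil]; omega
    have h2 : pvOcc cs v 1 = [] := by
      rw [pvOcc, show cs.length - 1 - 1 = 0 from by omega]; rfl
    rw [h1, pvMotifsFor, h2]; rfl

theorem pvJoin_none : pvFinalJoin (PVEntry.str "None") = "N o n e" := by decide

theorem pvMotifsFor_nil_of_not_mem (cs : List Char) (v : Char) (hnv : v ∉ cs) :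
    pvMotifsFor cs v = [] := by
  have h : pvOcc cs v 1 = [] := by
    rw [pvOcc, List.filter_eq_nil_iff]
    intro i _ hP
    exact hnv (List.mem_of_getElem? (by simpa using hP))
  rw [pvMotifsFor, h]; rfl

-- main induction over the peptide list (per_itemlist is [] at the start of each item)
set_option maxHeartbeats 1000000 in
theorem pvMain : ∀ (items : List String),
    (pvItemsA items []).map pvFinalJoin = Chymotrypsin_HighSpecificity_alt items := by
  intro items
  induction items with
  | nil => rfl
  | cons item rest ih =>
    rw [Chymotrypsin_HighSpecificity_alt, List.map_cons, ← Chymotrypsin_HighSpecificity_alt]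
    rw [pvItemsA]
    simp only []
    set cs := item.toList with hcs
    have hB : (['F', 'Y', 'W'].flatMap (fun v =>
        (PySem.List.pyRange 2 ((cs.length : Int) - 1) 1).filterMap (fun a =>
          match PySem.List.pyGet? cs a, PySem.List.pyGet? cs (a + 1) with
          | some x, some y =>
            if x == v && !((if v = 'W' then ['M', 'P'] else ['P']).contains y) then
              some (String.ofList (PySem.List.slice cs (some (a - 1)) (some (a + 3))))
            else none
          | _, _ => none)))
        = ['F', 'Y', 'W'].flatMap (pvMotifsFor cs) := by
      have hmap : ['F', 'Y', 'W'].map (fun v =>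
          (PySem.List.pyRange 2 ((cs.length : Int) - 1) 1).filterMap (fun a =>
            match PySem.List.pyGet? cs a, PySem.List.pyGet? cs (a + 1) with
            | some x, some y =>
              if x == v && !((if v = 'W' then ['M', 'P'] else ['P']).contains y) then
                some (String.ofList (PySem.List.slice cs (some (a - 1)) (some (a + 3))))
              else none
            | _, _ => none))
          = ['F', 'Y', 'W'].map (pvMotifsFor cs) :=
        List.map_congr_left (fun v _ => pvAlt_inner cs v)
      rw [List.flatMap_def, hmap, ← List.flatMap_def]
    by_cases hm : (['F', 'Y', 'W'].filter (fun x => PySem.Chars.isIn [x] cs)).length = 0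
    · rw [if_pos hm, List.map_cons, pvJoin_none, ih]
      have hflt : ∀ x ∈ ['F', 'Y', 'W'], ¬ (PySem.Chars.isIn [x] cs = true) := by
        rw [← List.filter_eq_nil_iff, ← List.length_eq_zero_iff]
        exact hm
      have hmot : ∀ v ∈ ['F', 'Y', 'W'], pvMotifsFor cs v = [] := by
        intro v hv
        apply pvMotifsFor_nil_of_not_mem
        intro hmem
        exact hflt v hv (by rw [← pvSingleton_infix_iff] at hmem
                            rwa [← PySem.Chars.isIn_iff_infix] at hmem)
      have hmot3 : ['F', 'Y', 'W'].flatMap (pvMotifsFor cs) = [] := by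
        simp only [List.flatMap_cons, List.flatMap_nil,
          hmot 'F' (by simp), hmot 'Y' (by simp), hmot 'W' (by simp)]
        rfl
      show _ = (fun item => _) item :: _
      simp only [hB, hmot3]
      rfl
    · rw [if_neg hm, pvResidues_spec cs ['F', 'Y', 'W'] [], List.nil_append]
      show List.map pvFinalJoin
          (if 0 < (['F', 'Y', 'W'].flatMap (pvMotifsFor cs)).length then
            PVEntry.lst (['F', 'Y', 'W'].flatMap (pvMotifsFor cs)) :: pvItemsA rest []
          else PVEntry.str "None" :: pvItemsA rest (['F', 'Y', 'W'].flatMap (pvMotifsFor cs))) = _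
      by_cases hlen0 : 0 < (['F', 'Y', 'W'].flatMap (pvMotifsFor cs)).length
      · rw [if_pos hlen0, List.map_cons, ih]
        show pvFinalJoin (PVEntry.lst (['F', 'Y', 'W'].flatMap (pvMotifsFor cs))) :: _
            = (fun item => _) item :: _
        simp only [hB, pvFinalJoin]
        rw [if_neg (by rw [List.isEmpty_iff]; intro hnil; rw [hnil] at hlen0; simp at hlen0)]
      · have hmot3 : ['F', 'Y', 'W'].flatMap (pvMotifsFor cs) = [] := by
          rw [← List.length_eq_zero_iff]; omega
        rw [if_neg hlen0, List.map_cons, pvJoin_none, hmot3, ih, hB, hmot3]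
        rfl


-- ===== VERDICT (by name: the statement is the Claim_ definition above) =====
theorem Chymotrypsin_HighSpecificity_spec : Claim_equal_Chymotrypsin_HighSpecificity := by
  intro l _
  show Chymotrypsin_HighSpecificity l = Chymotrypsin_HighSpecificity_alt l
  rw [Chymotrypsin_HighSpecificity]
  exact pvMain l
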